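-- pv_equiv track=rewrite | github.com/inuwyze/leet-code | perform string shift2.py | stringShift
-- ===== SOURCE A (Python) =====
-- from typing import List
--
-- def stringShift(s: str, shift: List[List[int]]) -> str:
--     final=0
--
--     for x in shift:
--
--         if x[0]:
--             final-=x[1]
--         else:
--             final+=x[1]
--
--     final%=len(s)
--
--
--
--     return s[final:]+s[:final] if final else s
-- ===== SOURCE B (Python) =====
-- from typing import List
--
-- def stringShift(s: str, shift: List[List[int]]) -> str:
--     # Simulate each shift operation immediately instead of summing a net offset.
--     for x in shift:
--         amt = (-x[1] if x[0] else x[1]) % len(s)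
--         s = s[amt:] + s[:amt]
--     return s
-- ===== Notes on version B (the rewrite author's own statement) =====
-- stated objective: alternative
-- what changed: B applies every shift operation to the string immediately (rotating by that operation's amount mod len each iteration) instead of A's two-phase computation of one net signed offset followed by a single slice-based rotation.
import Mathlib
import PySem

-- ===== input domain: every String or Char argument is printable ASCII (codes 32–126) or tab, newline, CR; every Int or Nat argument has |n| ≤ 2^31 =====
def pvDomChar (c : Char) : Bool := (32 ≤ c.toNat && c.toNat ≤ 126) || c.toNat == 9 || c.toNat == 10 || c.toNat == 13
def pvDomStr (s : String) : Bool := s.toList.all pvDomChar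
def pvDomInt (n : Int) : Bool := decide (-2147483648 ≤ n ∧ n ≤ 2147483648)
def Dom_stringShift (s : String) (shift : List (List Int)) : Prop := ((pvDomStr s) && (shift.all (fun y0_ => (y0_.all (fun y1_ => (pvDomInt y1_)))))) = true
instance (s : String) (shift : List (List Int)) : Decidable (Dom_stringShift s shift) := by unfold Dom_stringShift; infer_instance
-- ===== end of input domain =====

-- B simulates each shift operation on the string one at a time instead of A's single net-offset rotation;
-- equal return values are proved on nonempty strings with well-formed (length ≥ 2) shift entries.


-- ===== PORT A =====
-- x[0], x[1] via pyGetD (Pre_ guarantees length ≥ 2, so in range); `if x[0]` = int nonzero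
def stringShift (s : String) (shift : List (List Int)) : String :=
  let final : Int := shift.foldl (fun final x =>
    if PySem.List.pyGetD x 0 0 ≠ 0 then final - PySem.List.pyGetD x 1 0
    else final + PySem.List.pyGetD x 1 0) 0
  let final := PySem.Int.mod final (PySem.Str.len s)
  if final ≠ 0 then
    String.ofList (PySem.List.slice s.toList (some final) none ++
                   PySem.List.slice s.toList none (some final))
  else s

-- ===== PORT B =====
-- string carried as its character list through the loop (PySem string ops are wrappers over toList)
def stringShift_alt (s : String) (shift : List (List Int)) : String :=
  String.ofList (shift.foldl (fun cs x =>
    let amt := PySem.Int.mod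
      (if PySem.List.pyGetD x 0 0 ≠ 0 then -(PySem.List.pyGetD x 1 0)
       else PySem.List.pyGetD x 1 0) (PySem.List.len cs)
    PySem.List.slice cs (some amt) none ++ PySem.List.slice cs none (some amt)) s.toList)

-- ===== PRECONDITION & SPEC =====
-- Pre_ excludes exactly where A raises: empty s (ZeroDivisionError at `final %= len(s)`)
-- and shift entries with fewer than two elements (IndexError at x[0]/x[1]).
def Pre_stringShift (s : String) (shift : List (List Int)) : Prop :=
  s.toList ≠ [] ∧ ∀ x ∈ shift, 2 ≤ x.length
instance (s : String) (shift : List (List Int)) : Decidable (Pre_stringShift s shift) := by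
  unfold Pre_stringShift; infer_instance
def pvWitness_stringShift : String × List (List Int) := ("abcd", [[0, 3], [1, 1]])

def Spec_stringShift (s : String) (shift : List (List Int)) (out : String) : Prop :=
  out = stringShift_alt s shift
instance (s : String) (shift : List (List Int)) (out : String) : Decidable (Spec_stringShift s shift out) := by
  unfold Spec_stringShift; infer_instance

-- ===== CLAIM (what is proved, stated in full; the proofs are below) =====
def Claim_equal_stringShift : Prop := ∀ (s : String) (shift : List (List Int)), Dom_stringShift s shift → Pre_stringShift s shift → Spec_stringShift s shift (stringShift s shift)

-- ===== LEMMAS AND PROOFS =====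

-- signed amount of one operation
def pvAmt (x : List Int) : Int :=
  if PySem.List.pyGetD x 0 0 ≠ 0 then -(PySem.List.pyGetD x 1 0) else PySem.List.pyGetD x 1 0

-- A's accumulator is the running sum of pvAmt
lemma netA_eq (shift : List (List Int)) (acc : Int) :
    shift.foldl (fun final x =>
      if PySem.List.pyGetD x 0 0 ≠ 0 then final - PySem.List.pyGetD x 1 0
      else final + PySem.List.pyGetD x 1 0) acc
    = acc + (shift.map pvAmt).sum := by
  induction shift generalizing acc with
  | nil => simp
  | cons x rest ih =>
    simp only [List.foldl_cons, List.map_cons, List.sum_cons]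
    rw [ih]
    unfold pvAmt
    split_ifs <;> ring

-- one slice-pair rotation, as List.rotate
lemma rot_step {α : Type} (cs : List α) (a : Int) (hn : cs ≠ []) :
    PySem.List.slice cs (some (PySem.Int.mod a (cs.length : Int))) none ++
      PySem.List.slice cs none (some (PySem.Int.mod a (cs.length : Int)))
    = cs.rotate (PySem.Int.mod a (cs.length : Int)).toNat := by
  have hpos : (0 : Int) < (cs.length : Int) := by
    exact_mod_cast List.length_pos_iff.mpr hn
  have h0 := PySem.Int.mod_nonneg a hpos
  have hlt := PySem.Int.mod_lt a hpos
  rw [PySem.List.slice_from cs h0, PySem.List.slice_to cs h0,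
      List.rotate_eq_drop_append_take (by omega)]

-- modular addition of the two rotation counts
lemma modsum (a b : Int) (n : Nat) (hn : 0 < n) :
    ((a % (n : Int)).toNat + (b % (n : Int)).toNat) % n = ((a + b) % (n : Int)).toNat := by
  have hnz : (n : Int) ≠ 0 := by exact_mod_cast hn.ne'
  have ha : 0 ≤ a % (n : Int) := Int.emod_nonneg a hnz
  have hb : 0 ≤ b % (n : Int) := Int.emod_nonneg b hnz
  have hab : 0 ≤ (a + b) % (n : Int) := Int.emod_nonneg _ hnz
  have key : ((((a % (n : Int)).toNat + (b % (n : Int)).toNat) % n : Nat) : Int)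
      = (((a + b) % (n : Int)).toNat : Int) := by
    push_cast [Int.toNat_of_nonneg ha, Int.toNat_of_nonneg hb, Int.toNat_of_nonneg hab]
    rw [← Int.add_emod]
  exact_mod_cast key

-- B's fold over the operations is one rotation by the running sum, mod the length
lemma bfold_eq_rotate (shift : List (List Int)) (cs : List Char) (hn : cs ≠ []) :
    shift.foldl (fun cs x =>
        let amt := PySem.Int.mod (pvAmt x) (cs.length : Int)
        PySem.List.slice cs (some amt) none ++ PySem.List.slice cs none (some amt)) cs
    = cs.rotate (PySem.Int.mod ((shift.map pvAmt).sum) (cs.length : Int)).toNat := by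
  induction shift generalizing cs with
  | nil =>
    have hpos : (0 : Int) < (cs.length : Int) := by
      exact_mod_cast List.length_pos_iff.mpr hn
    simp [PySem.Int.mod_eq_emod_of_pos hpos]
  | cons x rest ih =>
    have hposN : 0 < cs.length := List.length_pos_iff.mpr hn
    have hpos : (0 : Int) < (cs.length : Int) := by exact_mod_cast hposN
    simp only [List.foldl_cons, List.map_cons, List.sum_cons]
    rw [rot_step cs (pvAmt x) hn]
    have hne : cs.rotate (PySem.Int.mod (pvAmt x) (cs.length : Int)).toNat ≠ [] := by
      simpa [List.rotate_eq_nil_iff] using hn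
    rw [ih _ hne, List.length_rotate, List.rotate_rotate,
        ← List.rotate_mod cs ((PySem.Int.mod (pvAmt x) (cs.length : Int)).toNat +
            (PySem.Int.mod ((rest.map pvAmt).sum) (cs.length : Int)).toNat)]
    simp only [PySem.Int.mod_eq_emod_of_pos hpos]
    rw [modsum _ _ _ hposN]

-- ===== VERDICT (by name: the statement is the Claim_ definition above) =====
theorem stringShift_spec : Claim_equal_stringShift := by
  intro s shift _ hpre
  obtain ⟨hs, -⟩ := hpre
  unfold Spec_stringShift
  simp only [stringShift, stringShift_alt, PySem.Str.len_eq, PySem.List.len_eq]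
  have hB : (fun (cs : List Char) (x : List Int) =>
      let amt := PySem.Int.mod
        (if PySem.List.pyGetD x 0 0 ≠ 0 then -(PySem.List.pyGetD x 1 0)
         else PySem.List.pyGetD x 1 0) ((cs.length : Int))
      PySem.List.slice cs (some amt) none ++ PySem.List.slice cs none (some amt))
      = (fun (cs : List Char) (x : List Int) =>
      let amt := PySem.Int.mod (pvAmt x) ((cs.length : Int))
      PySem.List.slice cs (some amt) none ++ PySem.List.slice cs none (some amt)) := by
    funext cs x
    simp [pvAmt]
  rw [hB, bfold_eq_rotate shift s.toList hs, netA_eq shift 0, zero_add]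
  by_cases h0 : PySem.Int.mod ((shift.map pvAmt).sum) ((s.toList.length : Int)) = 0
  · rw [h0]
    simp
  · rw [if_pos h0]
    congr 1
    exact rot_step s.toList ((shift.map pvAmt).sum) hs
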